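-- pv_equiv track=rewrite | github.com/Adnan525/cognitive_ai_api | utils.py | render_move_text
-- ===== SOURCE A (Python) =====
-- def render_move_text(moves: str):
--     if moves == "":
--         return "No moves yet"
--     moves_list = moves.split()
--     side = "White" if len(moves_list) % 2 == 1 else "Black"
--     prevs = "\n"
--     for i, move in enumerate(moves_list[:-1]):
--         prevs += f"{move} "
--         if (i + 1) % 2 == 0:
--             prevs += "\n"
--     return f"Current move : {side, moves_list[-1]} \nPrevious moves : {prevs}"
-- ===== SOURCE B (Python) =====
-- def render_move_text(moves: str):
--     if moves == "":
--         return "No moves yet"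
--     moves_list = moves.split()
--     side = "White" if len(moves_list) % 2 == 1 else "Black"
--     body = moves_list[:-1]
--     lines = []
--     while len(body) >= 2:
--         lines.append(f"{body[0]} {body[1]} \n")
--         body = body[2:]
--     tail = f"{body[0]} " if body else ""
--     prevs = "\n" + "".join(lines) + tail
--     return f"Current move : {(side, moves_list[-1])} \nPrevious moves : {prevs}"
-- ===== Notes on version B (the rewrite author's own statement) =====
-- stated objective: alternative
-- what changed: Replaces A's enumerate loop with a modulo-2 index test inside a string accumulator by a loop that consumes the previous moves two at a time, formatting each complete pair as one ready-made line and a lone trailing move separately.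
import Mathlib
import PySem

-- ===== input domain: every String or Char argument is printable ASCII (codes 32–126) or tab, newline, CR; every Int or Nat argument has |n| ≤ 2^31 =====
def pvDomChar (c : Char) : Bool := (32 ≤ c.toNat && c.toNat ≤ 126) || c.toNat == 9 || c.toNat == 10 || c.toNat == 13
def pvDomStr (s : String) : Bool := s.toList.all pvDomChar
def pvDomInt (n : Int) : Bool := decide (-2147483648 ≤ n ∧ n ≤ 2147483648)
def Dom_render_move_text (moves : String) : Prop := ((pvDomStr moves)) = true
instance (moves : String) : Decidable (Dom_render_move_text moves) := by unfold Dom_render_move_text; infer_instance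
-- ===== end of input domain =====

-- B replaces A's index-parity accumulator loop by consuming the previous moves two at a time
-- (a different decomposition, same cost); return value only, neither program mutates anything.

-- ===== PORT A =====
-- Python's repr(s) for a str, as used by the f-string '{side, moves_list[-1]}'.
-- Exact for strings of printable ASCII characters with no control characters —
-- the only strings it is applied to here ('White'/'Black' and tokens of str.split(),
-- which contain no whitespace).
def pyReprStr (s : String) : String :=
  let cs := s.toList
  let q : Char := if cs.contains '\'' && !cs.contains '"' then '"' else '\''
  String.ofList (q :: cs.flatMap (fun c => if c = '\\' || c = q then ['\\', c] else [c]) ++ [q])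

-- str((a, b)) for a pair of strings (what the f-string prints for the tuple)
def pyReprPair (a b : String) : String :=
  "(" ++ pyReprStr a ++ ", " ++ pyReprStr b ++ ")"

def render_move_text (moves : String) : String :=
  if moves = "" then "No moves yet"
  else
    let moves_list := PySem.Str.split₀ moves
    let side := if moves_list.length % 2 == 1 then "White" else "Black"
    let prevs := (PySem.List.enumerate (PySem.List.slice moves_list none (some (-1)))).foldl
      (fun acc p =>
        let acc := acc ++ p.2 ++ " "
        if PySem.Int.mod (p.1 + 1) 2 == 0 then acc ++ "\n" else acc) "\n"
    -- moves_list[-1] : IndexError when the split is empty; excluded by Pre_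
    "Current move : " ++ pyReprPair side ((PySem.List.pyGet? moves_list (-1)).getD "")
      ++ " \nPrevious moves : " ++ prevs

-- ===== PORT B =====
-- the while loop of Source B: peel complete pairs off the front, keep the formatted lines
def pvCollect : List String → List String × List String
  | a :: b :: rest =>
      let r := pvCollect rest
      ((a ++ " " ++ b ++ " \n") :: r.1, r.2)
  | l => ([], l)

def render_move_text_alt (moves : String) : String :=
  if moves = "" then "No moves yet"
  else
    let moves_list := PySem.Str.split₀ moves
    let side := if moves_list.length % 2 == 1 then "White" else "Black"
    let body := PySem.List.slice moves_list none (some (-1))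
    let lr := pvCollect body
    let tail := match lr.2 with | [] => "" | a :: _ => a ++ " "
    let prevs := "\n" ++ String.join lr.1 ++ tail
    "Current move : " ++ pyReprPair side ((PySem.List.pyGet? moves_list (-1)).getD "")
      ++ " \nPrevious moves : " ++ prevs

-- ===== PRECONDITION & SPEC =====
-- Pre_ excludes only the nonempty whitespace-only strings, on which A raises IndexError
-- (moves_list[-1] on the empty split) and B raises the same way.
def Pre_render_move_text (moves : String) : Prop :=
  moves = "" ∨ PySem.Str.split₀ moves ≠ []
instance (moves : String) : Decidable (Pre_render_move_text moves) := by
  unfold Pre_render_move_text; infer_instance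

def pvWitness_render_move_text : String := "e4 e5 Nf3"

def Spec_render_move_text (moves : String) (out : String) : Prop := out = render_move_text_alt moves
instance (moves : String) (out : String) : Decidable (Spec_render_move_text moves out) := by unfold Spec_render_move_text; infer_instance

-- ===== CLAIM (what is proved, stated in full; the proofs are below) =====
def Claim_equal_render_move_text : Prop := ∀ (moves : String), Dom_render_move_text moves → Pre_render_move_text moves → Spec_render_move_text moves (render_move_text moves)

-- ===== LEMMAS AND PROOFS =====

theorem pv_foldl_append (a : String) (ys : List String) :
    List.foldl (fun r s => r ++ s) a ys = a ++ List.foldl (fun r s => r ++ s) "" ys := by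
  induction ys generalizing a with
  | nil => simp
  | cons y ys ih =>
      simp only [List.foldl_cons, ih (a ++ y), ih ("" ++ y), String.append_assoc]
      simp

theorem pv_join_cons (x : String) (xs : List String) :
    String.join (x :: xs) = x ++ String.join xs := by
  simp only [String.join, List.foldl_cons]
  exact pv_foldl_append ("" ++ x) xs |>.trans (by simp)

theorem pv_mod_step (s : Int) (_h0 : 0 ≤ s) (h : PySem.Int.mod s 2 = 0) :
    PySem.Int.mod (s + 1 + 1) 2 = 0 ∧ PySem.Int.mod (s + 1) 2 = 1 := by
  simp only [PySem.Int.mod, Int.fmod_eq_emod] at *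
  simp at *
  omega

-- A's enumerate/parity fold equals B's pair-peeling, for any even start index
theorem pvLoopEq (l : List String) : ∀ (acc : String) (s : Int), 0 ≤ s → PySem.Int.mod s 2 = 0 →
    (PySem.List.enumerate l s).foldl
      (fun acc p =>
        let acc := acc ++ p.2 ++ " "
        if PySem.Int.mod (p.1 + 1) 2 == 0 then acc ++ "\n" else acc) acc
    = acc ++ String.join (pvCollect l).1
        ++ (match (pvCollect l).2 with | [] => "" | a :: _ => a ++ " ") := by
  induction l using pvCollect.induct with
  | case1 a b rest ih =>
      intro acc s hs hmod
      obtain ⟨h2, h1⟩ := pv_mod_step s hs hmod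
      simp only [PySem.List.enumerate_cons, List.foldl_cons, h1, h2, pvCollect,
        pv_join_cons]
      rw [ih _ (s + 1 + 1) (by omega) h2]
      simp [String.append_assoc]
  | case2 l h =>
      intro acc s hs hmod
      have hnd : ¬ (2:Int) ∣ (s + 1) := by
        simp only [PySem.Int.mod, Int.fmod_eq_emod] at hmod
        simp at hmod
        omega
      cases l with
      | nil => simp [PySem.List.enumerate_nil, pvCollect, String.join]
      | cons a t =>
          cases t with
          | nil =>
              simp [PySem.List.enumerate_cons, PySem.List.enumerate_nil, pvCollect,
                hnd, String.join, String.append_assoc]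
          | cons b r => exact (h a b r rfl).elim

-- ===== VERDICT (by name: the statement is the Claim_ definition above) =====
theorem render_move_text_spec : Claim_equal_render_move_text := by
  intro moves _ _
  unfold Spec_render_move_text render_move_text render_move_text_alt
  by_cases h : moves = ""
  · simp [h]
  · simp only [if_neg h]
    rw [pvLoopEq _ "\n" 0 (by omega) (by decide)]
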